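-- pv_equiv track=rewrite | github.com/Tulpana/ARC-AGI-2 | arc_agi_2_submission/ril/pattern_ops.py | _gap_fill_cells
-- ===== SOURCE A (Python) =====
-- from typing import Any, Dict, Iterable, List, Optional, Sequence, Tuple
--
-- Mask = List[List[bool]]
--
-- def _mask_coords(mask: Mask) -> List[Tuple[int, int]]:
--     coords: List[Tuple[int, int]] = []
--     for y, row in enumerate(mask):
--         for x, val in enumerate(row):
--             if val:
--                 coords.append((y, x))
--     return coords
--
-- def _gap_fill_cells(comps: List[Dict[str, object]], union_mask: Mask) -> List[Tuple[int, int]]: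
--     h = len(union_mask)
--     w = len(union_mask[0]) if h else 0
--     ownership = [[-1 for _ in range(w)] for _ in range(h)]
--     for idx, comp in enumerate(comps):
--         mask = comp["mask"]  # type: ignore[index]
--         for y, x in _mask_coords(mask):
--             ownership[y][x] = idx
--     additions: List[Tuple[int, int]] = []
--     for y in range(h):
--         for x in range(w):
--             if union_mask[y][x]:
--                 continue
--             neighbors = set()
--             for dy, dx in ((1, 0), (-1, 0), (0, 1), (0, -1)):
--                 ny, nx = y + dy, x + dx
--                 if 0 <= ny < h and 0 <= nx < w:
--                     owner = ownership[ny][nx]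
--                     if owner >= 0:
--                         neighbors.add(owner)
--             if len(neighbors) >= 2:
--                 additions.append((y, x))
--     return additions
-- ===== SOURCE B (Python) =====
-- def _gap_fill_cells(comps, union_mask):
--     h = len(union_mask)
--     w = len(union_mask[0]) if h else 0
--     owner = {}
--     for idx, comp in enumerate(comps):
--         for y, row in enumerate(comp["mask"]):
--             for x, val in enumerate(row):
--                 if val:
--                     owner[(y, x)] = idx
--     gap_owners = {}
--     for (y, x), idx in owner.items():
--         for ny, nx in ((y + 1, x), (y - 1, x), (y, x + 1), (y, x - 1)):
--             if 0 <= ny < h and 0 <= nx < w and not union_mask[ny][nx]: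
--                 gap_owners.setdefault((ny, nx), set()).add(idx)
--     return [(y, x) for y in range(h) for x in range(w)
--             if len(gap_owners.get((y, x), ())) >= 2]
-- ===== Notes on version B (the rewrite author's own statement) =====
-- stated objective: alternative
-- what changed: B replaces A's ownership grid plus per-empty-cell neighbour gather with a last-writer owner dict built once and a scatter pass that pushes each filled cell's owner into a per-empty-cell owner set, followed by a row-major emit scan.
import Mathlib
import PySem

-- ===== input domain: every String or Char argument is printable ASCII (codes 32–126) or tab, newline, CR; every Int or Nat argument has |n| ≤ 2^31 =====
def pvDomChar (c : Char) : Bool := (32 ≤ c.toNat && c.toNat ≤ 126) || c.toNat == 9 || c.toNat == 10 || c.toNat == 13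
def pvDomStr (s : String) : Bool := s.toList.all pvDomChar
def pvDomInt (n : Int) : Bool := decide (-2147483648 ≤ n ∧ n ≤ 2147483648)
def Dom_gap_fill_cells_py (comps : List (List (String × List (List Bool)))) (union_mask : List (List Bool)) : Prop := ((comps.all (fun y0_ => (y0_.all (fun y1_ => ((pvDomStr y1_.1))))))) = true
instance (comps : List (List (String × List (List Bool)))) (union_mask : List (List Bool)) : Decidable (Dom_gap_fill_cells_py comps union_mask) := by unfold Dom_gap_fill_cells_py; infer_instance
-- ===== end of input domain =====

-- B resolves last-writer ownership into a dict and SCATTERS each filled cell's owner to its empty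
-- neighbours, instead of A's per-empty-cell gather over an ownership grid; same return value on Pre_.

-- ===== PORT A =====
-- helper: Python _mask_coords
def pvMaskCoords (mask : List (List Bool)) : List (Int × Int) :=
  (PySem.List.enumerate mask).foldl (fun coords p =>
    (PySem.List.enumerate p.2).foldl
      (fun cs q => if q.2 then cs ++ [(p.1, q.1)] else cs) coords) []

def gap_fill_cells_py (comps : List (List (String × List (List Bool)))) (union_mask : List (List Bool)) : List (Int × Int) :=
  let h : Nat := union_mask.length
  let w : Nat := if h ≠ 0 then (union_mask.headD []).length else 0
  let ownership : List (List Int) :=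
    (PySem.List.enumerate comps).foldl (fun own p =>
      (pvMaskCoords ((PySem.Dict.ofList p.2).getD "mask" [])).foldl
        (fun own c =>
          PySem.List.pySetD own c.1
            (PySem.List.pySetD (PySem.List.pyGetD own c.1 []) c.2 p.1)) own)
      (List.replicate h (List.replicate w (-1)))
  (PySem.List.pyRange 0 (h : Int) 1).foldl (fun adds y =>
    (PySem.List.pyRange 0 (w : Int) 1).foldl (fun adds x =>
      if (PySem.List.pyGetD (PySem.List.pyGetD union_mask y []) x false) then adds
      else
        let neighbors : PySem.Set Int :=
          ([((1:Int),(0:Int)),(-1,0),(0,1),(0,-1)]).foldl (fun s dp =>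
            let ny := y + dp.1
            let nx := x + dp.2
            if 0 ≤ ny ∧ ny < (h : Int) ∧ 0 ≤ nx ∧ nx < (w : Int) then
              let owner := PySem.List.pyGetD (PySem.List.pyGetD ownership ny []) nx (-1)
              if 0 ≤ owner then PySem.Set.add s owner else s
            else s) PySem.Set.empty
        if 2 ≤ neighbors.length then adds ++ [(y, x)] else adds) adds) []

-- ===== PORT B =====
def gap_fill_cells_py_alt (comps : List (List (String × List (List Bool)))) (union_mask : List (List Bool)) : List (Int × Int) :=
  let h : Nat := union_mask.length
  let w : Nat := if h ≠ 0 then (union_mask.headD []).length else 0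
  let owner : PySem.Dict (Int × Int) Int :=
    (PySem.List.enumerate comps).foldl (fun d p =>
      (PySem.List.enumerate ((PySem.Dict.ofList p.2).getD "mask" [])).foldl (fun d r =>
        (PySem.List.enumerate r.2).foldl (fun d q =>
          if q.2 then d.insert (r.1, q.1) p.1 else d) d) d) PySem.Dict.empty
  let gapOwners : PySem.Dict (Int × Int) (PySem.Set Int) :=
    owner.items.foldl (fun g pr =>
      ([(pr.1.1 + 1, pr.1.2), (pr.1.1 - 1, pr.1.2), (pr.1.1, pr.1.2 + 1), (pr.1.1, pr.1.2 - 1)]).foldl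
        (fun g n =>
          if 0 ≤ n.1 ∧ n.1 < (h : Int) ∧ 0 ≤ n.2 ∧ n.2 < (w : Int) ∧
             ¬ (PySem.List.pyGetD (PySem.List.pyGetD union_mask n.1 []) n.2 false = true) then
            g.modify n PySem.Set.empty (fun s => PySem.Set.add s pr.2)
          else g) g) PySem.Dict.empty
  (PySem.List.pyRange 0 (h : Int) 1).foldl (fun acc y =>
    (PySem.List.pyRange 0 (w : Int) 1).foldl (fun acc x =>
      if 2 ≤ (gapOwners.getD (y, x) PySem.Set.empty).length then acc ++ [(y, x)] else acc) acc) []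

-- ===== PRECONDITION & SPEC =====
-- Pre_ excludes exactly the inputs on which the Python A raises: a component dict without a
-- "mask" key (KeyError), a mask with a true cell outside the h×w box of union_mask
-- (IndexError writing the ownership grid), and a union_mask row shorter than row 0
-- (IndexError in the scan).  pvW union_mask is the grid width w.
def pvW (union_mask : List (List Bool)) : Nat :=
  if union_mask.length ≠ 0 then (union_mask.headD []).length else 0

def Pre_gap_fill_cells_py (comps : List (List (String × List (List Bool)))) (union_mask : List (List Bool)) : Prop :=
  (∀ row ∈ union_mask, pvW union_mask ≤ row.length) ∧
  ∀ comp ∈ comps,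
    (PySem.Dict.ofList comp).contains "mask" = true ∧
    (∀ y, y < ((PySem.Dict.ofList comp).getD "mask" []).length →
      ∀ x, x < (((PySem.Dict.ofList comp).getD "mask" []).getD y []).length →
        (((PySem.Dict.ofList comp).getD "mask" []).getD y []).getD x false = true →
          y < union_mask.length ∧ x < pvW union_mask)
instance (comps : List (List (String × List (List Bool)))) (union_mask : List (List Bool)) : Decidable (Pre_gap_fill_cells_py comps union_mask) := by unfold Pre_gap_fill_cells_py; infer_instance

def pvWitness_gap_fill_cells_py : (List (List (String × List (List Bool)))) × List (List Bool) :=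
  ([[("mask", [[true]])], [("mask", [[false, true]])]], [[true, true], [false, false]])

def Spec_gap_fill_cells_py (comps : List (List (String × List (List Bool)))) (union_mask : List (List Bool)) (out : List (Int × Int)) : Prop := out = gap_fill_cells_py_alt comps union_mask
instance (comps : List (List (String × List (List Bool)))) (union_mask : List (List Bool)) (out : List (Int × Int)) : Decidable (Spec_gap_fill_cells_py comps union_mask out) := by unfold Spec_gap_fill_cells_py; infer_instance

-- ===== CLAIM (what is proved, stated in full; the proofs are below) =====
def Claim_equal_gap_fill_cells_py : Prop := ∀ (comps : List (List (String × List (List Bool)))) (union_mask : List (List Bool)), Dom_gap_fill_cells_py comps union_mask → Pre_gap_fill_cells_py comps union_mask → Spec_gap_fill_cells_py comps union_mask (gap_fill_cells_py comps union_mask)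


-- ===== LEMMAS AND PROOFS =====

-- proof-only abbreviations
def pvMaskOf (comp : List (String × List (List Bool))) : List (List Bool) :=
  (PySem.Dict.ofList comp).getD "mask" []

def pvMaskAt (m : List (List Bool)) (y x : Nat) : Bool := (m.getD y []).getD x false

def pvGet2 (g : List (List Int)) (y x : Nat) : Int := (g.getD y []).getD x (-1)

def pvOwnAt (comps : List (List (String × List (List Bool)))) (y x : Nat) : Int :=
  (PySem.List.enumerate comps).foldl
    (fun a p => if pvMaskAt (pvMaskOf p.2) y x then p.1 else a) (-1)

def pvNbrs (c : Int × Int) : List (Int × Int) :=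
  [(c.1 + 1, c.2), (c.1 - 1, c.2), (c.1, c.2 + 1), (c.1, c.2 - 1)]

-- mask coordinates as a flatMap
theorem pvMaskCoords_eq (m : List (List Bool)) :
    pvMaskCoords m = (PySem.List.enumerate m).flatMap
      (fun p => ((PySem.List.enumerate p.2).filter (fun q => q.2)).map (fun q => (p.1, q.1))) := by
  unfold pvMaskCoords
  rw [PySem.List.foldl_congr_mem _ _
    (fun coords p => coords ++ ((PySem.List.enumerate p.2).filter (fun q => q.2)).map (fun q => (p.1, q.1))) _
    (fun acc p _ => PySem.List.foldl_append_if (fun (q : Int × Bool) => q.2) (fun (q : Int × Bool) => (p.1, q.1)) (PySem.List.enumerate p.2) acc)]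
  rw [PySem.List.foldl_append_eq_flatMap]
  simp

theorem mem_pvMaskCoords (m : List (List Bool)) (c : Int × Int) :
    c ∈ pvMaskCoords m ↔ ∃ y x : Nat, c = ((y : Int), (x : Int)) ∧ pvMaskAt m y x = true := by
  rw [pvMaskCoords_eq]
  simp only [List.mem_flatMap, List.mem_map, List.mem_filter, PySem.List.mem_enumerate_iff]
  constructor
  · rintro ⟨p, ⟨k, hk, rfl⟩, q, ⟨⟨j, hj, rfl⟩, hq⟩, rfl⟩
    refine ⟨k, j, by simp, ?_⟩
    simp only [pvMaskAt]
    rw [List.getD_eq_getElem _ _ hk, List.getD_eq_getElem _ _ hj]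
    simpa using hq
  · rintro ⟨y, x, rfl, hm⟩
    simp only [pvMaskAt] at hm
    have hy : y < m.length := by
      by_contra hy
      have hrow : m.getD y [] = [] := by
        rw [List.getD_eq_getElem?_getD, List.getElem?_eq_none (by omega : m.length ≤ y)]; rfl
      rw [hrow] at hm
      simp at hm
    have hx : x < (m[y]).length := by
      by_contra hx
      rw [List.getD_eq_getElem _ _ hy, List.getD_eq_getElem?_getD,
        List.getElem?_eq_none (by omega : (m[y]).length ≤ x)] at hm
      simp at hm
    refine ⟨(y, m[y]), ⟨y, hy, by simp⟩, (x, m[y][x]), ⟨⟨x, hx, by simp⟩, ?_⟩, by simp⟩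
    rw [List.getD_eq_getElem _ _ hy, List.getD_eq_getElem _ _ hx] at hm
    simpa using hm

theorem cast_mem_pvMaskCoords (m : List (List Bool)) (y x : Nat) :
    ((y : Int), (x : Int)) ∈ pvMaskCoords m ↔ pvMaskAt m y x = true := by
  rw [mem_pvMaskCoords]
  constructor
  · rintro ⟨y', x', heq, hm⟩
    obtain ⟨h1, h2⟩ := Prod.mk.injEq .. ▸ heq
    rwa [show y = y' by exact_mod_cast h1, show x = x' by exact_mod_cast h2]
  · intro hm; exact ⟨y, x, rfl, hm⟩

theorem pvMaskCoords_nonneg (m : List (List Bool)) (c : Int × Int) (hc : c ∈ pvMaskCoords m) :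
    0 ≤ c.1 ∧ 0 ≤ c.2 := by
  rw [mem_pvMaskCoords] at hc
  obtain ⟨y, x, rfl, _⟩ := hc
  constructor <;> simp

-- generic: a fold of pointwise writes, read at a fixed key
theorem pv_foldl_write {σ α : Type} (wr : σ → (Int × Int) → σ) (rd : σ → α) (v : α)
    (k : Int × Int) (P : σ → Prop) :
    ∀ (L : List (Int × Int)) (s : σ),
      (∀ s' c, c ∈ L → P s' → P (wr s' c)) →
      (∀ s' c, c ∈ L → P s' → rd (wr s' c) = if c = k then v else rd s') →
      P s → P (L.foldl wr s) ∧ rd (L.foldl wr s) = if k ∈ L then v else rd s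
  | [], s, _, _, hs => by simpa using hs
  | c :: L, s, hP, hrd, hs => by
    have hP1 : P (wr s c) := hP s c (by simp) hs
    have ih := pv_foldl_write wr rd v k P L (wr s c)
      (fun s' c' hc' => hP s' c' (by simp [hc']))
      (fun s' c' hc' => hrd s' c' (by simp [hc'])) hP1
    refine ⟨ih.1, ?_⟩
    rw [List.foldl_cons, ih.2, hrd s c (by simp) hs]
    by_cases hkL : k ∈ L
    · simp [hkL]
    · by_cases hck : c = k
      · simp [hkL, hck]
      · have : k ≠ c := fun h => hck h.symm
        simp [hkL, hck, List.mem_cons, this]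

theorem pvMaskAt_bounds (m : List (List Bool)) (y x : Nat) (h : pvMaskAt m y x = true) :
    y < m.length ∧ x < (m.getD y []).length := by
  simp only [pvMaskAt] at h
  have hy : y < m.length := by
    by_contra hy
    have hrow : m.getD y [] = [] := by
      rw [List.getD_eq_getElem?_getD, List.getElem?_eq_none (by omega : m.length ≤ y)]; rfl
    rw [hrow] at h
    simp at h
  refine ⟨hy, ?_⟩
  by_contra hx
  rw [List.getD_eq_getElem?_getD (l := m.getD y []),
    List.getElem?_eq_none (by omega : (m.getD y []).length ≤ x)] at h
  simp at h

-- the grid invariant: h rows, each of width w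
def pvInv (h w : Nat) (g : List (List Int)) : Prop :=
  g.length = h ∧ ∀ i, (hi : i < g.length) → g[i].length = w

theorem pvInv_init (h w : Nat) : pvInv h w (List.replicate h (List.replicate w (-1))) := by
  constructor
  · simp
  · intro i hi; simp

theorem pvGet2_init (h w y x : Nat) (hy : y < h) (hx : x < w) :
    pvGet2 (List.replicate h (List.replicate w (-1))) y x = -1 := by
  simp only [pvGet2]
  rw [List.getD_replicate _ hy, List.getD_replicate _ hx]

-- one component's writes on the grid
theorem stepA_char (m : List (List Bool)) (idx : Int) (h w y x : Nat) (hy : y < h) (hx : x < w)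
    (hm : ∀ c ∈ pvMaskCoords m, c.1 < (h : Int) ∧ c.2 < (w : Int))
    (g : List (List Int)) (hg : pvInv h w g) :
    pvInv h w ((pvMaskCoords m).foldl
      (fun own c => PySem.List.pySetD own c.1
        (PySem.List.pySetD (PySem.List.pyGetD own c.1 []) c.2 idx)) g) ∧
    pvGet2 ((pvMaskCoords m).foldl
      (fun own c => PySem.List.pySetD own c.1
        (PySem.List.pySetD (PySem.List.pyGetD own c.1 []) c.2 idx)) g) y x
      = if pvMaskAt m y x then idx else pvGet2 g y x := by
  have key : ∀ (s' : List (List Int)) (c : Int × Int), c ∈ pvMaskCoords m → pvInv h w s' →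
      ((PySem.List.pySetD s' c.1 (PySem.List.pySetD (PySem.List.pyGetD s' c.1 []) c.2 idx))
        = s'.set c.1.toNat ((s'.getD c.1.toNat []).set c.2.toNat idx)
        ∧ c.1.toNat < h ∧ c.2.toNat < w) := by
    intro s' c hc hs'
    obtain ⟨hc1, hc2⟩ := pvMaskCoords_nonneg m c hc
    obtain ⟨hb1, hb2⟩ := hm c hc
    rw [PySem.List.pyGetD_of_nonneg _ _ hc1, PySem.List.pySetD_of_nonneg _ _ hc2,
      PySem.List.pySetD_of_nonneg _ _ hc1]
    exact ⟨rfl, by omega, by omega⟩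
  have hP : ∀ (s' : List (List Int)) (c : Int × Int), c ∈ pvMaskCoords m → pvInv h w s' →
      pvInv h w (PySem.List.pySetD s' c.1
        (PySem.List.pySetD (PySem.List.pyGetD s' c.1 []) c.2 idx)) := by
    intro s' c hc hs'
    obtain ⟨heq, ha, hb⟩ := key s' c hc hs'
    have hlen1 : c.1.toNat < s'.length := by rw [hs'.1]; exact ha
    have hrowlen : (s'.getD c.1.toNat []).length = w := by
      rw [List.getD_eq_getElem _ _ hlen1]; exact hs'.2 _ _
    rw [heq]
    refine ⟨by simpa using hs'.1, ?_⟩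
    intro i hi
    rw [List.getElem_set]
    split
    · simpa using hrowlen
    · exact hs'.2 i (by simpa using hi)
  have hrd : ∀ (s' : List (List Int)) (c : Int × Int), c ∈ pvMaskCoords m → pvInv h w s' →
      pvGet2 (PySem.List.pySetD s' c.1
        (PySem.List.pySetD (PySem.List.pyGetD s' c.1 []) c.2 idx)) y x
      = if c = ((y : Int), (x : Int)) then idx else pvGet2 s' y x := by
    intro s' c hc hs'
    obtain ⟨heq, ha, hb⟩ := key s' c hc hs'
    obtain ⟨hc1, hc2⟩ := pvMaskCoords_nonneg m c hc
    have hlen1 : c.1.toNat < s'.length := by rw [hs'.1]; exact ha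
    have hrowlen : (s'.getD c.1.toNat []).length = w := by
      rw [List.getD_eq_getElem _ _ hlen1]; exact hs'.2 _ _
    rw [heq]
    simp only [pvGet2]
    by_cases hay : c.1.toNat = y
    · subst hay
      have h1 : (s'.set c.1.toNat ((s'.getD c.1.toNat []).set c.2.toNat idx)).getD c.1.toNat []
          = (s'.getD c.1.toNat []).set c.2.toNat idx := by
        rw [List.getD_eq_getElem?_getD, List.getElem?_set]
        simp [hlen1]
      rw [h1]
      by_cases hbx : c.2.toNat = x
      · subst hbx
        rw [if_pos (by
          obtain ⟨ca, cb⟩ := c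
          simp only at hc1 hc2 ⊢
          simp only [Prod.mk.injEq]
          omega)]
        rw [List.getD_eq_getElem?_getD, List.getElem?_set]
        have hl2 : (s'[c.1.toNat]?.getD []).length = w := by
          rw [← List.getD_eq_getElem?_getD]; exact hrowlen
        simp [hl2, hb]
      · rw [if_neg (by
          intro hk
          apply hbx
          have h2 := congrArg Prod.snd hk
          simp only at h2
          rw [h2]
          simp)]
        rw [List.getD_eq_getElem?_getD, List.getElem?_set, if_neg hbx,
          ← List.getD_eq_getElem?_getD]
    · have h1 : (s'.set c.1.toNat ((s'.getD c.1.toNat []).set c.2.toNat idx)).getD y []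
          = s'.getD y [] := by
        rw [List.getD_eq_getElem?_getD, List.getElem?_set, if_neg hay,
          ← List.getD_eq_getElem?_getD]
      rw [h1, if_neg (by
        intro hk
        apply hay
        have h2 := congrArg Prod.fst hk
        simp only at h2
        rw [h2]
        simp)]
  have main := pv_foldl_write
    (fun own c => PySem.List.pySetD own c.1
      (PySem.List.pySetD (PySem.List.pyGetD own c.1 []) c.2 idx))
    (fun g => pvGet2 g y x) idx ((y : Int), (x : Int)) (pvInv h w)
    (pvMaskCoords m) g hP hrd hg
  refine ⟨main.1, ?_⟩
  have h2 := main.2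
  simp only at h2
  rw [h2]
  by_cases hmem : pvMaskAt m y x = true
  · rw [if_pos ((cast_mem_pvMaskCoords m y x).mpr hmem), if_pos hmem]
  · rw [if_neg (fun hk => hmem ((cast_mem_pvMaskCoords m y x).mp hk)),
      if_neg (by simpa using hmem)]

-- the whole ownership fold
set_option maxHeartbeats 1000000 in
theorem foldA (h w y x : Nat) (hy : y < h) (hx : x < w) :
    ∀ (ps : List (Int × List (String × List (List Bool)))) (g : List (List Int)),
      (∀ p ∈ ps, ∀ c ∈ pvMaskCoords (pvMaskOf p.2), c.1 < (h : Int) ∧ c.2 < (w : Int)) →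
      pvInv h w g →
      pvInv h w (ps.foldl (fun own p =>
        (pvMaskCoords (pvMaskOf p.2)).foldl
          (fun own c => PySem.List.pySetD own c.1
            (PySem.List.pySetD (PySem.List.pyGetD own c.1 []) c.2 p.1)) own) g) ∧
      pvGet2 (ps.foldl (fun own p =>
        (pvMaskCoords (pvMaskOf p.2)).foldl
          (fun own c => PySem.List.pySetD own c.1
            (PySem.List.pySetD (PySem.List.pyGetD own c.1 []) c.2 p.1)) own) g) y x
        = ps.foldl (fun a p => if pvMaskAt (pvMaskOf p.2) y x then p.1 else a) (pvGet2 g y x)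
  | [], g, _, hg => by simpa using hg
  | p :: ps, g, hps, hg => by
    have hstep := stepA_char (pvMaskOf p.2) p.1 h w y x hy hx (hps p (by simp)) g hg
    have ih := foldA h w y x hy hx ps
      ((pvMaskCoords (pvMaskOf p.2)).foldl
        (fun own c => PySem.List.pySetD own c.1
          (PySem.List.pySetD (PySem.List.pyGetD own c.1 []) c.2 p.1)) g)
      (fun p' hp' => hps p' (by simp [hp'])) hstep.1
    refine ⟨ih.1, ?_⟩
    rw [List.foldl_cons, List.foldl_cons, ih.2, hstep.2]

-- ===== B-side lemmas =====

theorem stepB_eq (m : List (List Bool)) (idx : Int) (d : PySem.Dict (Int × Int) Int) :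
    (PySem.List.enumerate m).foldl (fun d r =>
      (PySem.List.enumerate r.2).foldl (fun d q =>
        if q.2 then d.insert (r.1, q.1) idx else d) d) d
    = (pvMaskCoords m).foldl (fun d c => d.insert c idx) d := by
  rw [pvMaskCoords_eq, List.foldl_flatMap]
  apply PySem.List.foldl_congr_mem
  intro acc r _
  rw [List.foldl_map, List.foldl_filter]

theorem nodup_keys_foldl_insert (v : Int) :
    ∀ (L : List (Int × Int)) (d : PySem.Dict (Int × Int) Int), d.keys.Nodup →
      (L.foldl (fun d c => d.insert c v) d).keys.Nodup
  | [], d, hd => hd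
  | c :: L, d, hd =>
    nodup_keys_foldl_insert v L _ (PySem.Dict.nodup_keys_insert d c v hd)

def pvOwnerDict (comps : List (List (String × List (List Bool)))) : PySem.Dict (Int × Int) Int :=
  (PySem.List.enumerate comps).foldl (fun d p =>
    (PySem.List.enumerate (pvMaskOf p.2)).foldl (fun d r =>
      (PySem.List.enumerate r.2).foldl (fun d q =>
        if q.2 then d.insert (r.1, q.1) p.1 else d) d) d) PySem.Dict.empty

theorem foldB_keys_nodup :
    ∀ (ps : List (Int × List (String × List (List Bool)))) (d : PySem.Dict (Int × Int) Int),
      d.keys.Nodup →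
      (ps.foldl (fun d p =>
        (PySem.List.enumerate (pvMaskOf p.2)).foldl (fun d r =>
          (PySem.List.enumerate r.2).foldl (fun d q =>
            if q.2 then d.insert (r.1, q.1) p.1 else d) d) d) d).keys.Nodup
  | [], d, hd => hd
  | p :: ps, d, hd => by
    rw [List.foldl_cons]
    exact foldB_keys_nodup ps _ (by rw [stepB_eq]; exact nodup_keys_foldl_insert p.1 _ d hd)

theorem pvOwnerDict_keys_nodup (comps : List (List (String × List (List Bool)))) :
    (pvOwnerDict comps).keys.Nodup :=
  foldB_keys_nodup _ _ PySem.Dict.nodup_keys_empty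

theorem foldB_get? (k : Int × Int) :
    ∀ (ps : List (Int × List (String × List (List Bool)))) (d : PySem.Dict (Int × Int) Int),
      (ps.foldl (fun d p =>
        (PySem.List.enumerate (pvMaskOf p.2)).foldl (fun d r =>
          (PySem.List.enumerate r.2).foldl (fun d q =>
            if q.2 then d.insert (r.1, q.1) p.1 else d) d) d) d).get? k
      = ps.foldl (fun o p => if k ∈ pvMaskCoords (pvMaskOf p.2) then some p.1 else o) (d.get? k)
  | [], d => rfl
  | p :: ps, d => by
    rw [List.foldl_cons, List.foldl_cons, foldB_get? k ps]
    have hstep : ((PySem.List.enumerate (pvMaskOf p.2)).foldl (fun d r =>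
        (PySem.List.enumerate r.2).foldl (fun d q =>
          if q.2 then d.insert (r.1, q.1) p.1 else d) d) d).get? k
        = if k ∈ pvMaskCoords (pvMaskOf p.2) then some p.1 else d.get? k := by
      rw [stepB_eq]
      have main := pv_foldl_write (fun d c => d.insert c p.1) (fun d => d.get? k)
        (some p.1) k (fun _ => True) (pvMaskCoords (pvMaskOf p.2)) d
        (fun _ _ _ _ => trivial)
        (fun s' c _ _ => by
          show (s'.insert c p.1).get? k = if c = k then some p.1 else s'.get? k
          rw [PySem.Dict.get?_insert]
          by_cases hck : c = k
          · rw [if_pos hck, if_pos hck.symm]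
          · rw [if_neg hck, if_neg (fun h => hck h.symm)]) trivial
      simpa using main.2
    rw [hstep]

theorem enumerate_fst_nonneg {α : Type} (xs : List α) (p : Int × α)
    (hp : p ∈ PySem.List.enumerate xs) : 0 ≤ p.1 := by
  rw [PySem.List.mem_enumerate_iff] at hp
  obtain ⟨k, hk, rfl⟩ := hp
  simp

theorem enumerate_snd_mem {α : Type} (xs : List α) (p : Int × α)
    (hp : p ∈ PySem.List.enumerate xs) : p.2 ∈ xs := by
  rw [PySem.List.mem_enumerate_iff] at hp
  obtain ⟨k, hk, rfl⟩ := hp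
  simp

theorem opt_int_fold {α : Type} (C : α → Bool) :
    ∀ (ps : List (Int × α)), (∀ p ∈ ps, 0 ≤ p.1) → ∀ (a : Int),
    ps.foldl (fun o p => if C p.2 then some p.1 else o) (if 0 ≤ a then some a else none)
    = if 0 ≤ ps.foldl (fun b p => if C p.2 then p.1 else b) a then
        some (ps.foldl (fun b p => if C p.2 then p.1 else b) a) else none
  | [], _, a => by simp
  | p :: ps, h, a => by
    simp only [List.foldl_cons]
    have hinit : (if C p.2 then some p.1 else if 0 ≤ a then some a else none)
        = (if 0 ≤ (if C p.2 then p.1 else a) then some (if C p.2 then p.1 else a) else none) := by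
      by_cases hC : C p.2 <;> simp [hC, h p (by simp)]
    rw [hinit]
    exact opt_int_fold C ps (fun p' hp' => h p' (by simp [hp'])) _

theorem pvOwnerDict_get?_cast (comps : List (List (String × List (List Bool)))) (y x : Nat) :
    (pvOwnerDict comps).get? ((y : Int), (x : Int))
    = if 0 ≤ pvOwnAt comps y x then some (pvOwnAt comps y x) else none := by
  unfold pvOwnerDict
  rw [foldB_get?]
  have hcongr : (PySem.List.enumerate comps).foldl
      (fun o p => if ((y : Int), (x : Int)) ∈ pvMaskCoords (pvMaskOf p.2) then some p.1 else o)
      (PySem.Dict.empty.get? ((y : Int), (x : Int)))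
      = (PySem.List.enumerate comps).foldl
      (fun o p => if pvMaskAt (pvMaskOf p.2) y x then some p.1 else o)
      (if (0:Int) ≤ -1 then some (-1) else none) := by
    rw [PySem.Dict.get?_empty]
    apply PySem.List.foldl_congr_mem
    intro acc p _
    by_cases hmem : pvMaskAt (pvMaskOf p.2) y x = true
    · rw [if_pos ((cast_mem_pvMaskCoords _ y x).mpr hmem), if_pos hmem]
    · rw [if_neg (fun hk => hmem ((cast_mem_pvMaskCoords _ y x).mp hk)),
        if_neg (by simpa using hmem)]
  rw [show (PySem.Dict.empty.get? ((y : Int), (x : Int)) : Option Int) = none from rfl] at hcongr ⊢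
  rw [hcongr]
  unfold pvOwnAt
  exact opt_int_fold (fun c2 => pvMaskAt (pvMaskOf c2) y x) _
    (fun p hp => enumerate_fst_nonneg comps p hp) (-1)

theorem foldl_opt_if_false {α : Type} (Q : (Int × α) → Prop) [DecidablePred Q] :
    ∀ (ps : List (Int × α)) (init : Option Int), (∀ p ∈ ps, ¬ Q p) →
      ps.foldl (fun o p => if Q p then some p.1 else o) init = init
  | [], init, _ => rfl
  | p :: ps, init, h => by
    rw [List.foldl_cons, if_neg (h p (by simp))]
    exact foldl_opt_if_false Q ps init (fun p' hp' => h p' (by simp [hp']))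

theorem pvOwnerDict_get?_neg (comps : List (List (String × List (List Bool))))
    (k : Int × Int) (hk : k.1 < 0 ∨ k.2 < 0) : (pvOwnerDict comps).get? k = none := by
  unfold pvOwnerDict
  rw [foldB_get?, PySem.Dict.get?_empty]
  apply foldl_opt_if_false
  intro p _ hmem
  obtain ⟨h1, h2⟩ := pvMaskCoords_nonneg _ k hmem
  omega

theorem mem_items_iff_get? {κ ν : Type} [BEq κ] [LawfulBEq κ] (d : PySem.Dict κ ν)
    (hnd : d.keys.Nodup) (k : κ) (v : ν) :
    (k, v) ∈ d.items ↔ d.get? k = some v := by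
  constructor
  · intro h; exact PySem.Dict.get?_of_mem_items d h hnd
  · intro h
    simp only [PySem.Dict.get?] at h
    rw [Option.map_eq_some_iff] at h
    obtain ⟨p, hp, hp2⟩ := h
    have hk : p.1 = k := by simpa using List.find?_some hp
    have hpv : p = (k, v) := Prod.ext hk hp2
    exact hpv ▸ List.mem_of_find?_eq_some hp

theorem mem_pvNbrs_symm (c n : Int × Int) : c ∈ pvNbrs n ↔ n ∈ pvNbrs c := by
  obtain ⟨c1, c2⟩ := c
  obtain ⟨n1, n2⟩ := n
  simp only [pvNbrs, List.mem_cons, List.not_mem_nil, or_false, Prod.mk.injEq]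
  omega

-- the scatter fold: membership in the per-cell owner sets
theorem scatter_inner (V : Int × Int → Prop) [DecidablePred V] (o : Int) :
    ∀ (N : List (Int × Int)) (g : PySem.Dict (Int × Int) (PySem.Set Int)),
    (∀ c, (g.getD c PySem.Set.empty).Nodup) →
    (∀ c, ((N.foldl (fun g n => if V n then
        g.modify n PySem.Set.empty (fun s => s.add o) else g) g).getD c PySem.Set.empty).Nodup) ∧
    (∀ c o', o' ∈ (N.foldl (fun g n => if V n then
        g.modify n PySem.Set.empty (fun s => s.add o) else g) g).getD c PySem.Set.empty
      ↔ o' ∈ g.getD c PySem.Set.empty ∨ (o' = o ∧ c ∈ N ∧ V c))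
  | [], g, hg => ⟨hg, by simp⟩
  | n :: N, g, hg => by
    by_cases hV : V n
    · have hg' : ∀ c, ((g.modify n PySem.Set.empty (fun s => s.add o)).getD c PySem.Set.empty).Nodup := by
        intro c
        rw [PySem.Dict.getD_modify]
        split
        · exact PySem.Set.nodup_add _ _ (hg n)
        · exact hg c
      have ih := scatter_inner V o N _ hg'
      constructor
      · intro c
        have := ih.1 c
        simpa [List.foldl_cons, if_pos hV] using this
      · intro c o'
        rw [List.foldl_cons, if_pos hV, ih.2 c o', PySem.Dict.getD_modify]
        by_cases hc : c = n
        · subst hc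
          rw [if_pos rfl, PySem.Set.mem_add]
          simp only [List.mem_cons, true_or, true_and]
          tauto
        · rw [if_neg hc]
          simp only [List.mem_cons]
          constructor
          · rintro (h | h)
            · exact Or.inl h
            · exact Or.inr ⟨h.1, Or.inr h.2.1, h.2.2⟩
          · rintro (h | ⟨h1, (h2 | h2), h3⟩)
            · exact Or.inl h
            · exact absurd h2 hc
            · exact Or.inr ⟨h1, h2, h3⟩
    · have ih := scatter_inner V o N g hg
      constructor
      · intro c
        have := ih.1 c
        simpa [List.foldl_cons, if_neg hV] using this
      · intro c o'
        rw [List.foldl_cons, if_neg hV, ih.2 c o']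
        simp only [List.mem_cons]
        constructor
        · rintro (h | h)
          · exact Or.inl h
          · exact Or.inr ⟨h.1, Or.inr h.2.1, h.2.2⟩
        · rintro (h | ⟨h1, (h2 | h2), h3⟩)
          · exact Or.inl h
          · exact absurd h3 (h2 ▸ hV)
          · exact Or.inr ⟨h1, h2, h3⟩

theorem scatter_outer (V : Int × Int → Prop) [DecidablePred V] :
    ∀ (L : List ((Int × Int) × Int)) (g : PySem.Dict (Int × Int) (PySem.Set Int)),
    (∀ c, (g.getD c PySem.Set.empty).Nodup) →
    (∀ c, ((L.foldl (fun g pr => (pvNbrs pr.1).foldl (fun g n => if V n then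
        g.modify n PySem.Set.empty (fun s => s.add pr.2) else g) g) g).getD c PySem.Set.empty).Nodup) ∧
    (∀ c o, o ∈ (L.foldl (fun g pr => (pvNbrs pr.1).foldl (fun g n => if V n then
        g.modify n PySem.Set.empty (fun s => s.add pr.2) else g) g) g).getD c PySem.Set.empty
      ↔ o ∈ g.getD c PySem.Set.empty ∨ ∃ pr ∈ L, o = pr.2 ∧ c ∈ pvNbrs pr.1 ∧ V c)
  | [], g, hg => ⟨hg, by simp⟩
  | pr :: L, g, hg => by
    have hstep := scatter_inner V pr.2 (pvNbrs pr.1) g hg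
    have ih := scatter_outer V L _ hstep.1
    constructor
    · intro c
      have := ih.1 c
      simpa [List.foldl_cons] using this
    · intro c o
      rw [List.foldl_cons, ih.2 c o, hstep.2 c o]
      simp only [List.mem_cons]
      constructor
      · rintro ((h | h) | ⟨q, hq, h⟩)
        · exact Or.inl h
        · exact Or.inr ⟨pr, Or.inl rfl, h.1, h.2⟩
        · exact Or.inr ⟨q, Or.inr hq, h⟩
      · rintro (h | ⟨q, (hq | hq), h⟩)
        · exact Or.inl (Or.inl h)
        · exact Or.inl (Or.inr (hq ▸ h))
        · exact Or.inr ⟨q, hq, h⟩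

-- the gather fold of port A: membership in the neighbour set
theorem gather_char (own : List (List Int)) (hI wI : Int) (y x : Int) :
    ∀ (D : List (Int × Int)) (s : PySem.Set Int), s.Nodup →
    ((D.foldl (fun s dp =>
        if 0 ≤ y + dp.1 ∧ y + dp.1 < hI ∧ 0 ≤ x + dp.2 ∧ x + dp.2 < wI then
          if 0 ≤ PySem.List.pyGetD (PySem.List.pyGetD own (y + dp.1) []) (x + dp.2) (-1) then
            PySem.Set.add s (PySem.List.pyGetD (PySem.List.pyGetD own (y + dp.1) []) (x + dp.2) (-1))
          else s
        else s) s).Nodup) ∧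
    (∀ o, o ∈ D.foldl (fun s dp =>
        if 0 ≤ y + dp.1 ∧ y + dp.1 < hI ∧ 0 ≤ x + dp.2 ∧ x + dp.2 < wI then
          if 0 ≤ PySem.List.pyGetD (PySem.List.pyGetD own (y + dp.1) []) (x + dp.2) (-1) then
            PySem.Set.add s (PySem.List.pyGetD (PySem.List.pyGetD own (y + dp.1) []) (x + dp.2) (-1))
          else s
        else s) s
      ↔ o ∈ s ∨ ∃ dp ∈ D,
        (0 ≤ y + dp.1 ∧ y + dp.1 < hI ∧ 0 ≤ x + dp.2 ∧ x + dp.2 < wI) ∧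
        PySem.List.pyGetD (PySem.List.pyGetD own (y + dp.1) []) (x + dp.2) (-1) = o ∧ 0 ≤ o)
  | [], s, hs => ⟨hs, by simp⟩
  | dp :: D, s, hs => by
    by_cases hbnd : 0 ≤ y + dp.1 ∧ y + dp.1 < hI ∧ 0 ≤ x + dp.2 ∧ x + dp.2 < wI
    · by_cases hown : 0 ≤ PySem.List.pyGetD (PySem.List.pyGetD own (y + dp.1) []) (x + dp.2) (-1)
      · have ih := gather_char own hI wI y x D
          (PySem.Set.add s (PySem.List.pyGetD (PySem.List.pyGetD own (y + dp.1) []) (x + dp.2) (-1)))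
          (PySem.Set.nodup_add _ _ hs)
        constructor
        · have := ih.1
          simpa [List.foldl_cons, if_pos hbnd, if_pos hown] using this
        · intro o
          rw [List.foldl_cons, if_pos hbnd, if_pos hown, ih.2 o, PySem.Set.mem_add]
          simp only [List.mem_cons]
          constructor
          · rintro ((h | h) | ⟨q, hq, h⟩)
            · exact Or.inl h
            · exact Or.inr ⟨dp, Or.inl rfl, hbnd, h.symm, h ▸ hown⟩
            · exact Or.inr ⟨q, Or.inr hq, h⟩
          · rintro (h | ⟨q, (hq | hq), h⟩)
            · exact Or.inl (Or.inl h)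
            · subst hq; exact Or.inl (Or.inr h.2.1.symm)
            · exact Or.inr ⟨q, hq, h⟩
      · have ih := gather_char own hI wI y x D s hs
        constructor
        · have := ih.1
          simpa [List.foldl_cons, if_pos hbnd, if_neg hown] using this
        · intro o
          rw [List.foldl_cons, if_pos hbnd, if_neg hown, ih.2 o]
          simp only [List.mem_cons]
          constructor
          · rintro (h | ⟨q, hq, h⟩)
            · exact Or.inl h
            · exact Or.inr ⟨q, Or.inr hq, h⟩
          · rintro (h | ⟨q, (hq | hq), h⟩)
            · exact Or.inl h
            · subst hq; exact absurd (h.2.1 ▸ h.2.2) hown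
            · exact Or.inr ⟨q, hq, h⟩
    · have ih := gather_char own hI wI y x D s hs
      constructor
      · have := ih.1
        simpa [List.foldl_cons, if_neg hbnd] using this
      · intro o
        rw [List.foldl_cons, if_neg hbnd, ih.2 o]
        simp only [List.mem_cons]
        constructor
        · rintro (h | ⟨q, hq, h⟩)
          · exact Or.inl h
          · exact Or.inr ⟨q, Or.inr hq, h⟩
        · rintro (h | ⟨q, (hq | hq), h⟩)
          · exact Or.inl h
          · subst hq; exact absurd h.1 hbnd
          · exact Or.inr ⟨q, hq, h⟩

theorem foldl_int_if_ne {α : Type} (C : α → Bool) :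
    ∀ (ps : List (Int × α)) (a : Int),
      ps.foldl (fun b p => if C p.2 then p.1 else b) a = a ∨ ∃ p ∈ ps, C p.2 = true
  | [], a => Or.inl rfl
  | p :: ps, a => by
    by_cases hC : C p.2
    · exact Or.inr ⟨p, by simp, hC⟩
    · rw [List.foldl_cons, if_neg (by simpa using hC)]
      rcases foldl_int_if_ne C ps a with h | ⟨q, hq, h⟩
      · exact Or.inl h
      · exact Or.inr ⟨q, by simp [hq], h⟩

-- ===== Pre_-dependent facts and final assembly =====

theorem pvMaskOf_fold (comp : List (String × List (List Bool))) :
    (PySem.Dict.ofList comp).getD "mask" [] = pvMaskOf comp := rfl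

theorem pvNbrs_fold (c : Int × Int) :
    [(c.1 + 1, c.2), (c.1 - 1, c.2), (c.1, c.2 + 1), (c.1, c.2 - 1)] = pvNbrs c := rfl

theorem pvOwnerDict_fold (comps : List (List (String × List (List Bool)))) :
    (PySem.List.enumerate comps).foldl (fun d p =>
      (PySem.List.enumerate (pvMaskOf p.2)).foldl (fun d r =>
        (PySem.List.enumerate r.2).foldl (fun d q =>
          if q.2 then d.insert (r.1, q.1) p.1 else d) d) d) PySem.Dict.empty
    = pvOwnerDict comps := rfl

theorem pre_coords (comps : List (List (String × List (List Bool)))) (union_mask : List (List Bool))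
    (hpre2 : ∀ comp ∈ comps, ∀ y, y < (pvMaskOf comp).length →
      ∀ x, x < ((pvMaskOf comp).getD y []).length → pvMaskAt (pvMaskOf comp) y x = true →
        y < union_mask.length ∧ x < pvW union_mask) :
    ∀ p ∈ PySem.List.enumerate comps, ∀ c ∈ pvMaskCoords (pvMaskOf p.2),
      c.1 < (union_mask.length : Int) ∧ c.2 < (pvW union_mask : Int) := by
  intro p hp c hc
  have hmem := enumerate_snd_mem comps p hp
  obtain ⟨y, x, rfl, hmk⟩ := (mem_pvMaskCoords _ c).mp hc
  obtain ⟨hb1, hb2⟩ := pvMaskAt_bounds _ y x hmk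
  have hcl := hpre2 p.2 hmem y hb1 x hb2 hmk
  exact ⟨show (y : Int) < (union_mask.length : Int) by exact_mod_cast hcl.1,
    show (x : Int) < (pvW union_mask : Int) by exact_mod_cast hcl.2⟩

theorem pvOwnAt_bounds (comps : List (List (String × List (List Bool)))) (union_mask : List (List Bool))
    (hpre2 : ∀ comp ∈ comps, ∀ y, y < (pvMaskOf comp).length →
      ∀ x, x < ((pvMaskOf comp).getD y []).length → pvMaskAt (pvMaskOf comp) y x = true →
        y < union_mask.length ∧ x < pvW union_mask)
    (y x : Nat) (hnn : 0 ≤ pvOwnAt comps y x) :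
    y < union_mask.length ∧ x < pvW union_mask := by
  rcases foldl_int_if_ne (fun c2 => pvMaskAt (pvMaskOf c2) y x)
      (PySem.List.enumerate comps) (-1) with hcase | ⟨p, hp, hC⟩
  · exfalso
    unfold pvOwnAt at hnn
    rw [hcase] at hnn
    omega
  · obtain ⟨hb1, hb2⟩ := pvMaskAt_bounds _ y x hC
    exact hpre2 p.2 (enumerate_snd_mem comps p hp) y hb1 x hb2 hC

theorem get?_pvOwnerDict_iff (comps : List (List (String × List (List Bool)))) (union_mask : List (List Bool))
    (hpre2 : ∀ comp ∈ comps, ∀ y, y < (pvMaskOf comp).length →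
      ∀ x, x < ((pvMaskOf comp).getD y []).length → pvMaskAt (pvMaskOf comp) y x = true →
        y < union_mask.length ∧ x < pvW union_mask)
    (n : Int × Int) (o : Int) :
    (pvOwnerDict comps).get? n = some o ↔
      (0 ≤ n.1 ∧ n.1 < (union_mask.length : Int) ∧ 0 ≤ n.2 ∧ n.2 < (pvW union_mask : Int) ∧
        pvOwnAt comps n.1.toNat n.2.toNat = o ∧ 0 ≤ o) := by
  by_cases hneg : n.1 < 0 ∨ n.2 < 0
  · rw [pvOwnerDict_get?_neg comps n hneg]
    constructor
    · intro hk; cases hk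
    · rintro ⟨h1, _, h2, _⟩; omega
  · push_neg at hneg
    obtain ⟨a, b⟩ := n
    simp only at hneg
    obtain ⟨ha, hb⟩ := hneg
    have ha' : ((a.toNat : Int)) = a := Int.toNat_of_nonneg ha
    have hb' : ((b.toNat : Int)) = b := Int.toNat_of_nonneg hb
    rw [show ((a, b) : Int × Int) = ((a.toNat : Int), (b.toNat : Int)) by rw [ha', hb']]
    rw [pvOwnerDict_get?_cast]
    simp only [ha', hb']
    constructor
    · intro hsome
      by_cases hnn : 0 ≤ pvOwnAt comps a.toNat b.toNat
      · rw [if_pos hnn] at hsome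
        have heq := Option.some_inj.mp hsome
        obtain ⟨hb1, hb2⟩ := pvOwnAt_bounds comps union_mask hpre2 _ _ hnn
        exact ⟨ha, by omega, hb, by omega, heq, heq ▸ hnn⟩
      · rw [if_neg hnn] at hsome; cases hsome
    · rintro ⟨_, _, _, _, heq, ho⟩
      rw [if_pos (heq ▸ ho), heq]

-- the two programs agree
theorem pv_main (comps : List (List (String × List (List Bool)))) (union_mask : List (List Bool))
    (hpre : Pre_gap_fill_cells_py comps union_mask) :
    gap_fill_cells_py comps union_mask = gap_fill_cells_py_alt comps union_mask := by
  obtain ⟨hrows, hcomps⟩ := hpre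
  have hpre2 : ∀ comp ∈ comps, ∀ y, y < (pvMaskOf comp).length →
      ∀ x, x < ((pvMaskOf comp).getD y []).length → pvMaskAt (pvMaskOf comp) y x = true →
        y < union_mask.length ∧ x < pvW union_mask :=
    fun comp hc y hy x hx hmk => (hcomps comp hc).2 y hy x hx hmk
  simp only [gap_fill_cells_py, gap_fill_cells_py_alt]
  rw [show (if union_mask.length ≠ 0 then (union_mask.headD []).length else 0) = pvW union_mask
    from rfl]
  simp only [pvMaskOf_fold, pvNbrs_fold, pvOwnerDict_fold]
  apply PySem.List.foldl_congr_mem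
  intro acc0 y hy
  apply PySem.List.foldl_congr_mem
  intro acc x hx
  rw [PySem.List.mem_pyRange_one] at hy hx
  -- facts about coordinates
  have hbnds := pre_coords comps union_mask hpre2
  have hgrid : ∀ (n : Int × Int), 0 ≤ n.1 → n.1 < (union_mask.length : Int) →
      0 ≤ n.2 → n.2 < (pvW union_mask : Int) →
      PySem.List.pyGetD (PySem.List.pyGetD
        ((PySem.List.enumerate comps).foldl (fun own p =>
          (pvMaskCoords (pvMaskOf p.2)).foldl
            (fun own c => PySem.List.pySetD own c.1
              (PySem.List.pySetD (PySem.List.pyGetD own c.1 []) c.2 p.1)) own)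
          (List.replicate union_mask.length (List.replicate (pvW union_mask) (-1)))) n.1 []) n.2 (-1)
      = pvOwnAt comps n.1.toNat n.2.toNat := by
    intro n h1 h2 h3 h4
    rw [PySem.List.pyGetD_of_nonneg _ _ h1, PySem.List.pyGetD_of_nonneg _ _ h3]
    have hfa := foldA union_mask.length (pvW union_mask) n.1.toNat n.2.toNat
      (by omega) (by omega) (PySem.List.enumerate comps)
      (List.replicate union_mask.length (List.replicate (pvW union_mask) (-1)))
      hbnds (pvInv_init _ _)
    have := hfa.2
    rw [pvGet2_init _ _ _ _ (by omega) (by omega)] at this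
    simp only [pvGet2] at this
    rw [this]
    rfl
  -- the scatter dictionary of port B
  have hscat := scatter_outer
    (fun n => 0 ≤ n.1 ∧ n.1 < (union_mask.length : Int) ∧ 0 ≤ n.2 ∧ n.2 < (pvW union_mask : Int) ∧
      ¬ (PySem.List.pyGetD (PySem.List.pyGetD union_mask n.1 []) n.2 false = true))
    (pvOwnerDict comps).items PySem.Dict.empty
    (fun c => by rw [PySem.Dict.getD_empty]; exact List.nodup_nil)
  by_cases hmask : PySem.List.pyGetD (PySem.List.pyGetD union_mask y []) x false = true
  · -- masked cell: A skips; B's owner set is empty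
    rw [if_pos hmask]
    have hempty : ∀ o, o ∉ (((pvOwnerDict comps).items.foldl (fun g pr =>
        (pvNbrs pr.1).foldl (fun g n => if 0 ≤ n.1 ∧ n.1 < (union_mask.length : Int) ∧ 0 ≤ n.2 ∧
            n.2 < (pvW union_mask : Int) ∧
            ¬ (PySem.List.pyGetD (PySem.List.pyGetD union_mask n.1 []) n.2 false = true) then
          g.modify n PySem.Set.empty (fun s => s.add pr.2) else g) g)
        PySem.Dict.empty).getD (y, x) PySem.Set.empty) := by
      intro o ho
      rw [hscat.2 (y, x) o] at ho
      rcases ho with h | ⟨pr, _, _, _, hV⟩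
      · rw [PySem.Dict.getD_empty] at h; cases h
      · exact hV.2.2.2.2 hmask
    have hlen : (((pvOwnerDict comps).items.foldl (fun g pr =>
        (pvNbrs pr.1).foldl (fun g n => if 0 ≤ n.1 ∧ n.1 < (union_mask.length : Int) ∧ 0 ≤ n.2 ∧
            n.2 < (pvW union_mask : Int) ∧
            ¬ (PySem.List.pyGetD (PySem.List.pyGetD union_mask n.1 []) n.2 false = true) then
          g.modify n PySem.Set.empty (fun s => s.add pr.2) else g) g)
        PySem.Dict.empty).getD (y, x) PySem.Set.empty).length = 0 := by
      rw [List.eq_nil_iff_forall_not_mem.mpr hempty]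
      rfl
    rw [if_neg (by rw [hlen]; omega)]
  · rw [if_neg hmask]
    -- A's neighbour set
    have hgat := gather_char
      ((PySem.List.enumerate comps).foldl (fun own p =>
          (pvMaskCoords (pvMaskOf p.2)).foldl
            (fun own c => PySem.List.pySetD own c.1
              (PySem.List.pySetD (PySem.List.pyGetD own c.1 []) c.2 p.1)) own)
          (List.replicate union_mask.length (List.replicate (pvW union_mask) (-1))))
      (union_mask.length : Int) (pvW union_mask : Int) y x
      [((1:Int),(0:Int)), (-1,0), (0,1), (0,-1)] PySem.Set.empty List.nodup_nil
    -- B-side membership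
    have hVyx : 0 ≤ y ∧ y < (union_mask.length : Int) ∧ 0 ≤ x ∧ x < (pvW union_mask : Int) ∧
        ¬ (PySem.List.pyGetD (PySem.List.pyGetD union_mask y []) x false = true) :=
      ⟨hy.1, hy.2, hx.1, hx.2, hmask⟩
    have hmemB : ∀ o, o ∈ (((pvOwnerDict comps).items.foldl (fun g pr =>
        (pvNbrs pr.1).foldl (fun g n => if 0 ≤ n.1 ∧ n.1 < (union_mask.length : Int) ∧ 0 ≤ n.2 ∧
            n.2 < (pvW union_mask : Int) ∧
            ¬ (PySem.List.pyGetD (PySem.List.pyGetD union_mask n.1 []) n.2 false = true) then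
          g.modify n PySem.Set.empty (fun s => s.add pr.2) else g) g)
        PySem.Dict.empty).getD (y, x) PySem.Set.empty)
        ↔ ∃ n ∈ pvNbrs (y, x), (pvOwnerDict comps).get? n = some o := by
      intro o
      rw [hscat.2 (y, x) o, PySem.Dict.getD_empty]
      constructor
      · rintro (h | ⟨pr, hpr, rfl, hnb, _⟩)
        · cases h
        · refine ⟨pr.1, (mem_pvNbrs_symm _ _).mp hnb, ?_⟩
          exact (mem_items_iff_get? _ (pvOwnerDict_keys_nodup comps) pr.1 pr.2).mp
            (by simpa using hpr)
      · rintro ⟨n, hn, hget⟩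
        exact Or.inr ⟨(n, o),
          (mem_items_iff_get? _ (pvOwnerDict_keys_nodup comps) n o).mpr hget, rfl,
          (mem_pvNbrs_symm _ _).mpr hn, hVyx⟩
    -- A-side membership
    have hmemA : ∀ o, o ∈ ([((1:Int),(0:Int)), (-1,0), (0,1), (0,-1)].foldl (fun s dp =>
        if 0 ≤ y + dp.1 ∧ y + dp.1 < (union_mask.length : Int) ∧ 0 ≤ x + dp.2 ∧
            x + dp.2 < (pvW union_mask : Int) then
          if 0 ≤ PySem.List.pyGetD (PySem.List.pyGetD
              ((PySem.List.enumerate comps).foldl (fun own p =>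
                (pvMaskCoords (pvMaskOf p.2)).foldl
                  (fun own c => PySem.List.pySetD own c.1
                    (PySem.List.pySetD (PySem.List.pyGetD own c.1 []) c.2 p.1)) own)
                (List.replicate union_mask.length (List.replicate (pvW union_mask) (-1)))) (y + dp.1) []) (x + dp.2) (-1) then
            PySem.Set.add s (PySem.List.pyGetD (PySem.List.pyGetD
              ((PySem.List.enumerate comps).foldl (fun own p =>
                (pvMaskCoords (pvMaskOf p.2)).foldl
                  (fun own c => PySem.List.pySetD own c.1
                    (PySem.List.pySetD (PySem.List.pyGetD own c.1 []) c.2 p.1)) own)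
                (List.replicate union_mask.length (List.replicate (pvW union_mask) (-1)))) (y + dp.1) []) (x + dp.2) (-1))
          else s
        else s) PySem.Set.empty)
        ↔ ∃ n ∈ pvNbrs (y, x), (pvOwnerDict comps).get? n = some o := by
      intro o
      rw [hgat.2 o]
      have hQ : ∀ n : Int × Int,
          ((0 ≤ n.1 ∧ n.1 < (union_mask.length : Int) ∧ 0 ≤ n.2 ∧ n.2 < (pvW union_mask : Int)) ∧
            PySem.List.pyGetD (PySem.List.pyGetD
              ((PySem.List.enumerate comps).foldl (fun own p =>
                (pvMaskCoords (pvMaskOf p.2)).foldl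
                  (fun own c => PySem.List.pySetD own c.1
                    (PySem.List.pySetD (PySem.List.pyGetD own c.1 []) c.2 p.1)) own)
                (List.replicate union_mask.length (List.replicate (pvW union_mask) (-1)))) n.1 []) n.2 (-1) = o ∧ 0 ≤ o)
          ↔ (pvOwnerDict comps).get? n = some o := by
        intro n
        rw [get?_pvOwnerDict_iff comps union_mask hpre2 n o]
        constructor
        · rintro ⟨⟨h1, h2, h3, h4⟩, hrd, ho⟩
          rw [hgrid n h1 h2 h3 h4] at hrd
          exact ⟨h1, h2, h3, h4, hrd, ho⟩
        · rintro ⟨h1, h2, h3, h4, hown, ho⟩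
          exact ⟨⟨h1, h2, h3, h4⟩, by rw [hgrid n h1 h2 h3 h4]; exact hown, ho⟩
      constructor
      · rintro (h | ⟨dp, hdp, hq1, hq2, hq3⟩)
        · cases h
        · refine ⟨(y + dp.1, x + dp.2), ?_, (hQ (y + dp.1, x + dp.2)).mp ⟨hq1, hq2, hq3⟩⟩
          simp only [List.mem_cons, List.not_mem_nil, or_false] at hdp
          rcases hdp with rfl | rfl | rfl | rfl <;> simp [pvNbrs] <;> omega
      · rintro ⟨n, hn, hget⟩
        obtain ⟨⟨h1, h2, h3, h4⟩, hrd, ho⟩ := (hQ n).mpr hget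
        simp only [pvNbrs, List.mem_cons, List.not_mem_nil, or_false] at hn
        refine Or.inr ?_
        rcases hn with rfl | rfl | rfl | rfl <;> dsimp only at h1 h2 h3 h4 hrd
        · refine ⟨(1, 0), by simp, by dsimp only; omega, ?_, ho⟩
          dsimp only
          rw [add_zero]
          exact hrd
        · refine ⟨(-1, 0), by simp, by dsimp only; omega, ?_, ho⟩
          dsimp only
          rw [show y + (-1 : Int) = y - 1 by ring, add_zero]
          exact hrd
        · refine ⟨(0, 1), by simp, by dsimp only; omega, ?_, ho⟩
          dsimp only
          rw [add_zero]
          exact hrd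
        · refine ⟨(0, -1), by simp, by dsimp only; omega, ?_, ho⟩
          dsimp only
          rw [add_zero, show x + (-1 : Int) = x - 1 by ring]
          exact hrd
    have hperm := (List.perm_ext_iff_of_nodup hgat.1 (hscat.1 (y, x))).mpr
      (fun o => by rw [hmemA o, hmemB o])
    rw [hperm.length_eq]
    rfl


-- ===== VERDICT (by name: the statement is the Claim_ definition above) =====
theorem gap_fill_cells_py_spec : Claim_equal_gap_fill_cells_py := by
  intro comps union_mask _hdom hpre
  exact pv_main comps union_mask hpre
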